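-- pv_equiv track=rewrite | github.com/Kohdz/Algorithms | AmazonOAIII/13_mostCommonWord.py | mostCommonWordII
-- ===== SOURCE A (Python) =====
-- import collections, re
--
-- def mostCommonWordII(paragraph, banned):
--
--     clean_paragraph = ""
--     for c in paragraph:
--         if c in {',', '.', '!', ' '}:
--             clean_paragraph += " "
--         elif c.isalpha():
--             clean_paragraph += c.lower()
--
--     banned = set([x.lower().strip() for x in banned])
--
--     words = [x for x in clean_paragraph.split() if x not in banned]
--
--     counts = collections.Counter(words)
--
--     return counts.most_common(1)[0][0]
-- ===== SOURCE B (Python) =====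
-- def mostCommonWordII(paragraph, banned):
--     banned_set = {x.lower().strip() for x in banned}
--     counts = {}
--     buf = []
--
--     def flush():
--         if buf:
--             w = ''.join(buf)
--             if w not in banned_set:
--                 counts[w] = counts.get(w, 0) + 1
--             buf.clear()
--
--     for c in paragraph:
--         if c in ',.! ':
--             flush()
--         elif c.isalpha():
--             buf.append(c.lower())
--     flush()
--     return max(counts, key=counts.get)
-- ===== Notes on version B (the rewrite author's own statement) =====
-- stated objective: alternative
-- what changed: B replaces A's build-cleaned-string/split/filter/Counter pipeline by a single streaming pass that tokenizes with a character buffer and counts non-banned words into a dict as they are flushed, then takes the first max-count key; no intermediate cleaned string, word list or Counter is materialized (one pass instead of four).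
import Mathlib
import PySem

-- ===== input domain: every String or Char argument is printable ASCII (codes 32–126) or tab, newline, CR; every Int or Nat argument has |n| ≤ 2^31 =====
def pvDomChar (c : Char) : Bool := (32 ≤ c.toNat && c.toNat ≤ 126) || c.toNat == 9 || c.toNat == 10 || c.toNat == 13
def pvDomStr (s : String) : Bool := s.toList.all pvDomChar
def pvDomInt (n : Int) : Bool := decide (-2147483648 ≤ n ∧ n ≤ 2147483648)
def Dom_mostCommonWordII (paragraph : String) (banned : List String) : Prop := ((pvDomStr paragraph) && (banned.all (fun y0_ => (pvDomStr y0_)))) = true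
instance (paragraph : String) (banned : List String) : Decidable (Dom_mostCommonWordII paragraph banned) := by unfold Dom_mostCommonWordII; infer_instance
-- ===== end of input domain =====

-- B streams over the paragraph once, tokenizing with a character buffer and counting
-- non-banned words into a dict as they are flushed, instead of A's cleaned-string /
-- split / filter / Counter pipeline (objective: alternative decomposition, same cost).


-- shared helpers (both Pythons test the same separator characters and normalize banned the same way)
def pvSep (c : Char) : Bool := c == ',' || c == '.' || c == '!' || c == ' '

def pvBannedSet (banned : List String) : PySem.Set (List Char) :=
  PySem.Set.ofList (banned.map (fun x => PySem.Chars.strip (PySem.Chars.lower x.toList)))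

-- ===== PORT A =====
def mostCommonWordII (paragraph : String) (banned : List String) : String :=
  let clean : List Char := paragraph.toList.foldl
    (fun acc c =>
      if pvSep c then acc ++ [' ']
      else if PySem.Chars.isalpha c then acc ++ [PySem.Chars.lowerChar c]
      else acc) []
  let bannedSet := pvBannedSet banned
  let words := (PySem.Chars.split₀ clean).filter (fun x => !(PySem.Set.contains bannedSet x))
  let counts := PySem.Dict.counter words
  match PySem.List.max? counts.items (fun p => p.2) with
  | some p => String.ofList p.1
  | none => ""   -- Python raises IndexError here (no non-banned word); excluded by Pre_

-- ===== PORT B =====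
-- flush(): bump the count of the buffered word if it is non-banned, clear the buffer
def pvBump (bs : PySem.Set (List Char)) (d : PySem.Dict (List Char) Int) (w : List Char) :
    PySem.Dict (List Char) Int :=
  if !(PySem.Set.contains bs w) then d.insert w (d.getD w 0 + 1) else d

def pvFlush (bs : PySem.Set (List Char)) (s : List Char × PySem.Dict (List Char) Int) :
    List Char × PySem.Dict (List Char) Int :=
  if s.1 = [] then s else ([], pvBump bs s.2 s.1)

def pvStep (bs : PySem.Set (List Char)) (s : List Char × PySem.Dict (List Char) Int) (c : Char) :
    List Char × PySem.Dict (List Char) Int :=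
  if pvSep c then pvFlush bs s
  else if PySem.Chars.isalpha c then (s.1 ++ [PySem.Chars.lowerChar c], s.2)
  else s

def mostCommonWordII_alt (paragraph : String) (banned : List String) : String :=
  let bannedSet := pvBannedSet banned
  let fin := pvFlush bannedSet (paragraph.toList.foldl (pvStep bannedSet) ([], PySem.Dict.empty))
  match PySem.List.max? fin.2.keys (fun w => fin.2.getD w 0) with
  | some w => String.ofList w
  | none => ""   -- Python's max raises ValueError here (no non-banned word); excluded by Pre_

-- ===== PRECONDITION & SPEC =====
-- what one paragraph character contributes to the cleaned text (used to state Pre_)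
def pvGap (c : Char) : List Char :=
  if pvSep c then [' '] else if PySem.Chars.isalpha c then [PySem.Chars.lowerChar c] else []

-- Pre_ excludes exactly the inputs with no non-banned word, where Python A raises
-- IndexError (and Python B's max raises ValueError).
def Pre_mostCommonWordII (paragraph : String) (banned : List String) : Prop :=
  (PySem.Chars.split₀ (paragraph.toList.flatMap pvGap)).filter
    (fun x => !(PySem.Set.contains (pvBannedSet banned) x)) ≠ []
instance (paragraph : String) (banned : List String) : Decidable (Pre_mostCommonWordII paragraph banned) := by unfold Pre_mostCommonWordII; infer_instance

def pvWitness_mostCommonWordII : String × List String := ("Bob hit a ball, the hit BALL flew", ["hit"])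

def Spec_mostCommonWordII (paragraph : String) (banned : List String) (out : String) : Prop := out = mostCommonWordII_alt paragraph banned
instance (paragraph : String) (banned : List String) (out : String) : Decidable (Spec_mostCommonWordII paragraph banned out) := by unfold Spec_mostCommonWordII; infer_instance

-- ===== CLAIM (what is proved, stated in full; the proofs are below) =====
def Claim_equal_mostCommonWordII : Prop := ∀ (paragraph : String) (banned : List String), Dom_mostCommonWordII paragraph banned → Pre_mostCommonWordII paragraph banned → Spec_mostCommonWordII paragraph banned (mostCommonWordII paragraph banned)

-- ===== LEMMAS AND PROOFS =====

lemma pv_toNat_ofNat (n : Nat) (h : n < 55296) : (Char.ofNat n).toNat = n := by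
  unfold Char.ofNat
  split
  · exact Char.toNat_ofNatAux _
  · rename_i hv; exact absurd (Or.inl (by omega)) hv

-- a lowered alpha character is not whitespace
lemma pv_lower_not_space (c : Char) (h : PySem.Chars.isalpha c = true) :
    PySem.Chars.isspace (PySem.Chars.lowerChar c) = false := by
  have hb : ∀ d : Char, 97 ≤ d.toNat → d.toNat ≤ 122 → PySem.Chars.isspace d = false := by
    intro d h1 h2
    simp [PySem.Chars.isspace]
    omega
  simp only [PySem.Chars.isalpha, PySem.Chars.isupper, PySem.Chars.islower, Bool.or_eq_true,
    Bool.and_eq_true, decide_eq_true_eq] at h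
  rcases h with ⟨h1, h2⟩ | ⟨h1, h2⟩
  · have h1' : 65 ≤ c.toNat := h1
    have h2' : c.toNat ≤ 90 := h2
    have hu : PySem.Chars.isupper c = true := by
      simp [PySem.Chars.isupper]; exact ⟨h1, h2⟩
    rw [PySem.Chars.lowerChar, if_pos hu]
    apply hb <;> rw [pv_toNat_ofNat _ (by omega)] <;> omega
  · have h1' : 97 ≤ c.toNat := h1
    have h2' : c.toNat ≤ 122 := h2
    have hu : PySem.Chars.isupper c = false := by
      simp [PySem.Chars.isupper]
      intro h3
      show 90 < c.toNat
      omega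
    rw [PySem.Chars.lowerChar, if_neg (by simp [hu])]
    exact hb c h1' h2'

-- split₀.go over a whitespace-free prefix just accumulates it
lemma pv_go_no_space (xs : List Char) (hxs : ∀ c ∈ xs, PySem.Chars.isspace c = false) :
    ∀ ys cur acc, PySem.Chars.split₀.go (xs ++ ys) cur acc =
      PySem.Chars.split₀.go ys (xs.reverse ++ cur) acc := by
  induction xs with
  | nil => intro ys cur acc; simp
  | cons x t ih =>
    intro ys cur acc
    have hx : PySem.Chars.isspace x = false := hxs x (by simp)
    rw [List.cons_append, PySem.Chars.split₀.go, if_neg (by simp [hx])]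
    rw [ih (fun c hc => hxs c (by simp [hc]))]
    simp

-- the accumulator of split₀.go is a prefix of the result
lemma pv_go_acc (ys : List Char) : ∀ cur acc,
    PySem.Chars.split₀.go ys cur acc = acc.reverse ++ PySem.Chars.split₀.go ys cur [] := by
  induction ys with
  | nil =>
    intro cur acc
    rw [PySem.Chars.split₀.go, PySem.Chars.split₀.go]
    by_cases h : cur.isEmpty <;> simp [h]
  | cons c t ih =>
    intro cur acc
    rw [PySem.Chars.split₀.go, PySem.Chars.split₀.go]
    by_cases hs : PySem.Chars.isspace c
    · by_cases he : cur.isEmpty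
      · simp only [hs, he, if_pos]
        exact ih [] acc
      · simp only [hs, he, Bool.false_eq_true, ite_false, ite_true]
        rw [ih [] (cur.reverse :: acc), ih [] [cur.reverse]]
        simp
    · simp only [hs, Bool.false_eq_true, ite_false]
      exact ih (c :: cur) acc

lemma pv_split_no_space (xs : List Char) (hxs : ∀ c ∈ xs, PySem.Chars.isspace c = false) :
    PySem.Chars.split₀ xs = if xs = [] then [] else [xs] := by
  have h0 : PySem.Chars.split₀ xs = PySem.Chars.split₀.go (xs ++ []) [] [] := by
    simp [PySem.Chars.split₀]
  rw [h0, pv_go_no_space xs hxs [] [] [], PySem.Chars.split₀.go]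
  cases xs with
  | nil => simp
  | cons a t => simp

lemma pv_split_space (xs ys : List Char) (hxs : ∀ c ∈ xs, PySem.Chars.isspace c = false) :
    PySem.Chars.split₀ (xs ++ ' ' :: ys) =
      (if xs = [] then [] else [xs]) ++ PySem.Chars.split₀ ys := by
  rw [PySem.Chars.split₀, pv_go_no_space xs hxs (' ' :: ys) [] [],
    PySem.Chars.split₀.go]
  have hsp : PySem.Chars.isspace ' ' = true := by decide
  rw [if_pos hsp]
  cases xs with
  | nil => simp [PySem.Chars.split₀]
  | cons a t =>
    rw [if_neg (by simp)]
    rw [pv_go_acc ys []]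
    simp [PySem.Chars.split₀]

lemma pv_max?_map_aux {α β κ : Type} [LT κ] [DecidableLT κ] (f : α → β) (g : β → κ)
    (l : List α) : ∀ (acc : Option α),
    (l.map f).foldl (fun acc x =>
      match acc with
      | none => some x
      | some m => if g m < g x then some x else some m) (acc.map f) =
    (l.foldl (fun acc x =>
      match acc with
      | none => some x
      | some m => if g (f m) < g (f x) then some x else some m) acc).map f := by
  induction l with
  | nil => intro acc; simp
  | cons x t ih =>
    intro acc
    cases acc with
    | none => simpa using ih (some x)
    | some m =>
      simp only [List.map_cons, List.foldl_cons, Option.map_some]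
      by_cases h : g (f m) < g (f x)
      · simpa [h] using ih (some x)
      · simpa [h] using ih (some m)

-- max? over a mapped list
lemma pv_max?_map {α β κ : Type} [LT κ] [DecidableLT κ] (l : List α) (f : α → β) (g : β → κ) :
    PySem.List.max? (l.map f) g = (PySem.List.max? l (fun x => g (f x))).map f := by
  unfold PySem.List.max?
  simpa using pv_max?_map_aux f g l none

-- B's streaming loop computes the fold of pvBump over the words of the cleaned text
lemma pv_invariant (bs : PySem.Set (List Char)) (cs : List Char) :
    ∀ buf d, (∀ c ∈ buf, PySem.Chars.isspace c = false) →
      pvFlush bs (cs.foldl (pvStep bs) (buf, d)) =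
        ([], (PySem.Chars.split₀ (buf ++ cs.flatMap pvGap)).foldl (pvBump bs) d) := by
  induction cs with
  | nil =>
    intro buf d hbuf
    simp only [List.foldl_nil, List.flatMap_nil, List.append_nil]
    rw [pv_split_no_space buf hbuf]
    by_cases hb : buf = []
    · subst hb; simp [pvFlush]
    · simp [pvFlush, hb]
  | cons c t ih =>
    intro buf d hbuf
    by_cases hsep : pvSep c = true
    · have hg : pvGap c = [' '] := by simp [pvGap, hsep]
      simp only [List.foldl_cons, List.flatMap_cons, hg]
      rw [show pvStep bs (buf, d) c = pvFlush bs (buf, d) from by simp [pvStep, hsep]]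
      rw [show buf ++ ([' '] ++ t.flatMap pvGap) = buf ++ ' ' :: t.flatMap pvGap from by simp]
      rw [pv_split_space buf _ hbuf, List.foldl_append]
      by_cases hb : buf = []
      · subst hb
        rw [show pvFlush bs (([] : List Char), d) = ([], d) from by simp [pvFlush]]
        rw [ih [] d (by simp)]
        simp
      · rw [show pvFlush bs (buf, d) = ([], pvBump bs d buf) from by simp [pvFlush, hb]]
        rw [ih [] _ (by simp)]
        simp [hb]
    · by_cases ha : PySem.Chars.isalpha c = true
      · have hg : pvGap c = [PySem.Chars.lowerChar c] := by simp [pvGap, hsep, ha]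
        simp only [List.foldl_cons, List.flatMap_cons, hg]
        rw [show pvStep bs (buf, d) c = (buf ++ [PySem.Chars.lowerChar c], d) from by
          simp [pvStep, hsep, ha]]
        rw [ih _ d (by
          intro x hx
          rcases List.mem_append.1 hx with h | h
          · exact hbuf x h
          · simp at h; subst h; exact pv_lower_not_space c ha)]
        simp
      · have hg : pvGap c = [] := by simp [pvGap, hsep, ha]
        simp only [List.foldl_cons, List.flatMap_cons, hg, List.nil_append]
        rw [show pvStep bs (buf, d) c = (buf, d) from by simp [pvStep, hsep, ha]]
        exact ih buf d hbuf

-- the two ports agree on every input (the Pre_/Dom_ hypotheses are not even needed: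
-- where Python would raise, both ports return "")
lemma pv_eq (paragraph : String) (banned : List String) :
    mostCommonWordII paragraph banned = mostCommonWordII_alt paragraph banned := by
  simp only [mostCommonWordII, mostCommonWordII_alt]
  have hclean : paragraph.toList.foldl
      (fun acc c =>
        if pvSep c then acc ++ [' ']
        else if PySem.Chars.isalpha c then acc ++ [PySem.Chars.lowerChar c]
        else acc) [] = paragraph.toList.flatMap pvGap := by
    rw [PySem.List.foldl_congr_mem _ _ (fun acc c => acc ++ pvGap c) _
      (by intro acc x hx; simp only [pvGap]; split_ifs <;> simp)]
    simpa using PySem.List.foldl_append_eq_flatMap pvGap paragraph.toList ([] : List Char)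
  rw [hclean]
  have hfin := pv_invariant (pvBannedSet banned) paragraph.toList [] PySem.Dict.empty (by simp)
  simp only [List.nil_append] at hfin
  rw [hfin]
  have hcnt : (PySem.Chars.split₀ (paragraph.toList.flatMap pvGap)).foldl
      (pvBump (pvBannedSet banned)) PySem.Dict.empty =
      PySem.Dict.counter ((PySem.Chars.split₀ (paragraph.toList.flatMap pvGap)).filter
        (fun x => !(PySem.Set.contains (pvBannedSet banned) x))) := by
    rw [show pvBump (pvBannedSet banned) = (fun d w =>
        if !(PySem.Set.contains (pvBannedSet banned) w) then d.insert w (d.getD w 0 + 1) else d)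
      from rfl]
    rw [PySem.List.foldl_if_eq_foldl_filter]
    rw [PySem.Dict.foldl_insert_getD_add_one_eq_counter]
  rw [hcnt]
  dsimp only
  have hkey : (fun w => (PySem.Dict.counter ((PySem.Chars.split₀ (paragraph.toList.flatMap pvGap)).filter
      (fun x => !(PySem.Set.contains (pvBannedSet banned) x)))).getD w 0) =
      (fun w => (((PySem.Chars.split₀ (paragraph.toList.flatMap pvGap)).filter
      (fun x => !(PySem.Set.contains (pvBannedSet banned) x))).count w : Int)) := by
    funext w
    exact PySem.Dict.getD_counter _ _
  rw [PySem.Dict.items_counter, pv_max?_map, PySem.Dict.keys_counter, hkey]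
  cases PySem.List.max? (PySem.Set.ofList ((PySem.Chars.split₀ (paragraph.toList.flatMap pvGap)).filter
      (fun x => !(PySem.Set.contains (pvBannedSet banned) x))))
      (fun k => (((PySem.Chars.split₀ (paragraph.toList.flatMap pvGap)).filter
      (fun x => !(PySem.Set.contains (pvBannedSet banned) x))).count k : Int)) with
  | none => rfl
  | some k => simp

-- ===== VERDICT (by name: the statement is the Claim_ definition above) =====
theorem mostCommonWordII_spec : Claim_equal_mostCommonWordII := by
  intro paragraph banned _ _
  exact pv_eq paragraph banned
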